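-- pv_equiv track=rewrite | github.com/KubaSiwiec/MazeSolver | sim_ffnbf.py | distances_calculated
-- ===== SOURCE A (Python) =====
-- def distances_calculated(numbers):
--     for i in range(len(numbers)):
--         if i in (119, 120, 135, 136):
--             # center of the maze, distance is 0, countinue then
--             continue
--         else:
--             if numbers[i] == 0:
--                 return False
--     return True
-- ===== SOURCE B (Python) =====
-- def distances_calculated(numbers):
--     # The non-center cells form three contiguous segments; check each for zeros.
--     return (0 not in numbers[:119]
--             and 0 not in numbers[121:135]
--             and 0 not in numbers[137:])
-- ===== Notes on version B (the rewrite author's own statement) =====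
-- stated objective: simpler
-- what changed: Replaced the per-index loop with its 4-way membership test by three contiguous slice scans (numbers[:119], numbers[121:135], numbers[137:]) checked with 'not in', which run as C-level scans.
import Mathlib
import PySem

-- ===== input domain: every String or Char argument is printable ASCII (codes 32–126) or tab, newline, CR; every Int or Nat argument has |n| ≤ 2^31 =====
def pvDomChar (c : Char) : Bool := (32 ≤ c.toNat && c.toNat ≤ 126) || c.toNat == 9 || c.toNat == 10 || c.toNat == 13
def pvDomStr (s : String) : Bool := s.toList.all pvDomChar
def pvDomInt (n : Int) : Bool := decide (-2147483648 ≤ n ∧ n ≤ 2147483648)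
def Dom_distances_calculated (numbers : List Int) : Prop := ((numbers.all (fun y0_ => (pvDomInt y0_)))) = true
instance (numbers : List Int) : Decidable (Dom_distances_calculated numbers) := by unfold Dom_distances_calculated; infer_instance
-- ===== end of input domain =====

-- B replaces A's per-index loop (skipping the four center indices) by three
-- contiguous slice scans; objective: simpler.


-- ===== PORT A =====
-- 'for i in range(len(numbers)): …' with early 'return False'
def pvLoopA (numbers : List Int) (i : Nat) : Bool :=
  if h : i < numbers.length then
    if i = 119 ∨ i = 120 ∨ i = 135 ∨ i = 136 then
      pvLoopA numbers (i + 1)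
    else
      if numbers[i] = 0 then false else pvLoopA numbers (i + 1)
  else true
termination_by numbers.length - i

def distances_calculated (numbers : List Int) : Bool := pvLoopA numbers 0

-- ===== PORT B =====
def distances_calculated_alt (numbers : List Int) : Bool :=
  !(PySem.List.slice numbers none (some 119)).contains 0
  && !(PySem.List.slice numbers (some 121) (some 135)).contains 0
  && !(PySem.List.slice numbers (some 137) none).contains 0

-- ===== PRECONDITION & SPEC =====
def Spec_distances_calculated (numbers : List Int) (out : Bool) : Prop := out = distances_calculated_alt numbers
instance (numbers : List Int) (out : Bool) : Decidable (Spec_distances_calculated numbers out) := by unfold Spec_distances_calculated; infer_instance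

-- ===== CLAIM (what is proved, stated in full; the proofs are below) =====
def Claim_equal_distances_calculated : Prop := ∀ (numbers : List Int), Dom_distances_calculated numbers → Spec_distances_calculated numbers (distances_calculated numbers)

-- ===== LEMMAS AND PROOFS =====

-- A's loop returns true iff every not-skipped index from i on holds a nonzero value.
lemma pvLoopA_eq_true_iff (numbers : List Int) (i : Nat) :
    pvLoopA numbers i = true ↔
      ∀ j (_ : j < numbers.length), i ≤ j →
        ¬(j = 119 ∨ j = 120 ∨ j = 135 ∨ j = 136) → numbers[j] ≠ 0 := by
  induction i using pvLoopA.induct numbers with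
  | case1 i h hskip ih =>
    rw [pvLoopA, dif_pos h, if_pos hskip, ih]
    constructor
    · intro H j hj hij hns
      exact H j hj (by omega) hns
    · intro H j hj hij hns
      by_cases hji : j = i
      · subst hji; exact absurd hskip hns
      · exact H j hj (by omega) hns
  | case2 i h hskip hz =>
    rw [pvLoopA, dif_pos h, if_neg hskip, if_pos hz]
    exact iff_of_false (by simp) (fun H => H i h (le_refl i) hskip hz)
  | case3 i h hskip hz ih =>
    rw [pvLoopA, dif_pos h, if_neg hskip, if_neg hz, ih]
    constructor
    · intro H j hj hij hns
      by_cases hji : j = i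
      · subst hji; exact hz
      · exact H j hj (by omega) hns
    · intro H j hj hij hns
      exact H j hj (by omega) hns
  | case4 i h =>
    rw [pvLoopA, dif_neg h]
    simp only [true_iff]
    intro j hj hij _
    omega

-- zero occurs in a drop-take segment iff it occurs at an index of that segment
lemma mem_seg_iff (xs : List Int) (a n : Nat) :
    (0 : Int) ∈ (xs.drop a).take n ↔
      ∃ j, a ≤ j ∧ j < a + n ∧ ∃ h : j < xs.length, xs[j] = 0 := by
  rw [List.mem_iff_getElem]
  constructor
  · rintro ⟨k, hk, hval⟩
    have hlen : k < n ∧ a + k < xs.length := by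
      have := hk; simp [List.length_take, List.length_drop] at this; omega
    refine ⟨a + k, by omega, by omega, by omega, ?_⟩
    have : ((xs.drop a).take n)[k] = xs[a + k] := by
      rw [List.getElem_take, List.getElem_drop]
    rw [this] at hval
    exact hval
  · rintro ⟨j, haj, hjn, hj, hval⟩
    refine ⟨j - a, ?_, ?_⟩
    · simp [List.length_take, List.length_drop]; omega
    · have : ((xs.drop a).take n)[j - a]'(by simp [List.length_take, List.length_drop]; omega) = xs[a + (j - a)]'(by omega) := by
        rw [List.getElem_take, List.getElem_drop]
      rw [this]
      have : a + (j - a) = j := by omega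
      simp only [this]
      exact hval

-- bridging List.contains to membership, specialised to 0
lemma contains_zero_iff (l : List Int) : l.contains 0 = true ↔ (0 : Int) ∈ l :=
  List.contains_iff_mem

lemma contains_zero_eq_false_iff (l : List Int) : l.contains 0 = false ↔ (0 : Int) ∉ l := by
  simp

-- ===== VERDICT (by name: the statement is the Claim_ definition above) =====
theorem distances_calculated_spec : Claim_equal_distances_calculated := by
  intro numbers _
  unfold Spec_distances_calculated distances_calculated distances_calculated_alt
  have hs1 : PySem.List.slice numbers none (some 119) = (numbers.drop 0).take 119 := by
    simpa using PySem.List.slice_to_natCast numbers 119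
  have hs2 : PySem.List.slice numbers (some 121) (some 135) = (numbers.drop 121).take 14 := by
    simpa using PySem.List.slice_natCast numbers 121 135
  have hs3 : PySem.List.slice numbers (some 137) none = (numbers.drop 137).take numbers.length := by
    have h := PySem.List.slice_from_natCast numbers 137
    simp only [Nat.cast_ofNat] at h
    rw [h, List.take_of_length_le (by simp)]
  rw [hs1, hs2, hs3]
  rcases Bool.eq_false_or_eq_true (pvLoopA numbers 0) with hA | hA
  · -- A is true: every segment is clean
    rw [hA]
    have hall := (pvLoopA_eq_true_iff numbers 0).mp hA
    symm
    simp only [Bool.and_eq_true, Bool.not_eq_true', contains_zero_eq_false_iff]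
    refine ⟨⟨?_, ?_⟩, ?_⟩ <;>
    · intro hx
      rw [mem_seg_iff] at hx
      obtain ⟨j, hja, hjb, hj, hz⟩ := hx
      exact hall j hj (by omega) (by omega) hz
  · -- A is false: some bad index exists; show B is false too
    rw [hA]
    have hne : ¬ (pvLoopA numbers 0 = true) := by simp [hA]
    rw [pvLoopA_eq_true_iff] at hne
    push Not at hne
    obtain ⟨j, hj, _, hns, hz⟩ := hne
    symm
    simp only [Bool.and_eq_false_iff, Bool.not_eq_false', contains_zero_iff]
    by_cases h1 : j < 119
    · exact Or.inl (Or.inl ((mem_seg_iff numbers 0 119).mpr ⟨j, by omega, by omega, hj, hz⟩))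
    by_cases h2 : j < 137
    · exact Or.inl (Or.inr ((mem_seg_iff numbers 121 14).mpr ⟨j, by omega, by omega, hj, hz⟩))
    · exact Or.inr ((mem_seg_iff numbers 137 numbers.length).mpr
        ⟨j, by omega, by omega, hj, hz⟩)
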